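-- pv_equiv track=rewrite | github.com/cma2015/iwa-miRNA | Source_code/modulei/scripts/db_page.py | matchRNAStructure
-- ===== SOURCE A (Python) =====
-- def isParenthese(ch):
--     if( ch=='(' or ch==')' ):
--         return True
--     else:
--         return False
--
-- def matchRNAStructure( RNAStructure ):
--     RNALen = len(RNAStructure)
--     matchedPosList = [-1]*RNALen
--     stack = []
--     stackPos = []
--     for i in range(RNALen):
--         a = RNAStructure[i]
--         if( isParenthese(a) == False ):
--             continue
--         if( len(stack) == 0 ):
--             #empty stack, record item
--             stack.append(a)
--             stackPos.append(i)
--         else: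
--             #pop last item in stack and stackPos
--             stack_lastItem = stack.pop()
--             stackPos_lastItem = stackPos.pop()
--             if( stack_lastItem == '(' and a == ')' ):
--                 #meet a match, record matched position
--                 matchedPosList[i] = stackPos_lastItem
--                 matchedPosList[stackPos_lastItem] = i
--                 continue
--             else:
--                 #have to record
--                 stack.append( stack_lastItem )
--                 stackPos.append( stackPos_lastItem )
--                 stack.append(a)
--                 stackPos.append(i)
--     return matchedPosList
-- ===== SOURCE B (Python) =====
-- def matchRNAStructure(RNAStructure):
--     n = len(RNAStructure)
--     matchedPosList = [-1] * n
--     def seq(i):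
--         # recursive-descent: consume a maximal region starting at i in which every
--         # ')' is matched; fill in matched positions; return n if everything up to
--         # the end was consumed, else the index of the first unmatched ')'.
--         while i < n:
--             c = RNAStructure[i]
--             if c == '(':
--                 j = seq(i + 1)
--                 if j == n:
--                     return n
--                 matchedPosList[i] = j
--                 matchedPosList[j] = i
--                 i = j + 1
--             elif c == ')':
--                 return i
--             else:
--                 i += 1
--         return n
--     i = 0
--     while i < n:
--         i = seq(i)
--         if i < n:
--             i += 1  # skip a top-level unmatched ')'
--     return matchedPosList
-- ===== Notes on version B (the rewrite author's own statement) =====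
-- stated objective: alternative
-- what changed: Replaced A's explicit two-stack scanning machine by a recursive-descent parser: a recursive routine consumes a region whose ')'s are all matched (recursion handles nesting instead of any stack) and a top loop skips unmatched ')'s.
import Mathlib
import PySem

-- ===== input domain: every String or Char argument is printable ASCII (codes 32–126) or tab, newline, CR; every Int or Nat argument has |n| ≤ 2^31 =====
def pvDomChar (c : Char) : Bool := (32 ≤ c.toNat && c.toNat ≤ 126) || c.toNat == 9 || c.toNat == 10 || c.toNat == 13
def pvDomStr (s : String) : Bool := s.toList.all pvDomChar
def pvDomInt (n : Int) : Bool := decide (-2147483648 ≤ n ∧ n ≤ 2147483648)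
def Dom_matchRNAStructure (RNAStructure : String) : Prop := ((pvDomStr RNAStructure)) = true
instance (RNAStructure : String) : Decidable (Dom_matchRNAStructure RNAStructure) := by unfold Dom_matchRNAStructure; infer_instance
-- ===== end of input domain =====

-- B replaces A's two-stack scanning machine by a recursive-descent parser (objective: alternative, same O(n) cost).

-- ===== PORT A =====
-- helper isParenthese from the Python module
def isParenthese (ch : Char) : Bool :=
  if ch = '(' ∨ ch = ')' then true else false

-- one iteration of A's for-loop; state = (matchedPosList, stack, stackPos); stacks keep the top first
def stepA (st : List Int × List Char × List Nat) (p : Char × Nat) : List Int × List Char × List Nat :=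
  let m := st.1
  let stack := st.2.1
  let stackPos := st.2.2
  let a := p.1
  let i := p.2
  if isParenthese a = false then st
  else
    match stack, stackPos with
    | [], _ => (m, [a], [i])
    | c :: cr, j :: jr =>
        if c = '(' ∧ a = ')' then ((m.set i (j : Int)).set j (i : Int), cr, jr)
        else (m, a :: c :: cr, i :: j :: jr)
    | _ :: _, [] => st

def matchRNAStructure (RNAStructure : String) : List Int :=
  let cs := RNAStructure.toList
  (cs.zipIdx.foldl stepA (List.replicate cs.length (-1), [], [])).1

-- ===== PORT B =====
-- B's inner recursive routine `seq`: consume from index i a maximal region whose ')'s are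
-- all matched, filling matches into m; returns (stop index, m'); the stop index is n (all
-- consumed) or the position of the first ')' unmatched at this level.  The fuel argument
-- only makes the recursion total (n+1 always suffices, proved below); it mirrors no Python code.
def seqB (cs : List Char) (n : Nat) : Nat → Nat → List Int → Nat × List Int
  | 0, i, m => (i, m)
  | fuel + 1, i, m =>
    if i < n then
      let c := cs.getD i ' '
      if c = '(' then
        let r := seqB cs n fuel (i + 1) m
        if r.1 = n then (n, r.2)
        else seqB cs n fuel (r.1 + 1) ((r.2.set i (r.1 : Int)).set r.1 (i : Int))
      else if c = ')' then (i, m)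
      else seqB cs n fuel (i + 1) m
    else (n, m)

-- B's top-level while loop: call seq, skip a top-level unmatched ')'
def loopB (cs : List Char) (n : Nat) : Nat → Nat → List Int → List Int
  | 0, _, m => m
  | fuel + 1, i, m =>
    if i < n then
      let r := seqB cs n (n + 1) i m
      if r.1 < n then loopB cs n fuel (r.1 + 1) r.2 else r.2
    else m

def matchRNAStructure_alt (RNAStructure : String) : List Int :=
  let cs := RNAStructure.toList
  let n := cs.length
  loopB cs n (n + 1) 0 (List.replicate n (-1))

-- ===== PRECONDITION & SPEC =====
def Spec_matchRNAStructure (RNAStructure : String) (out : List Int) : Prop := out = matchRNAStructure_alt RNAStructure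
instance (RNAStructure : String) (out : List Int) : Decidable (Spec_matchRNAStructure RNAStructure out) := by unfold Spec_matchRNAStructure; infer_instance

-- ===== CLAIM (what is proved, stated in full; the proofs are below) =====
def Claim_equal_matchRNAStructure : Prop := ∀ (RNAStructure : String), Dom_matchRNAStructure RNAStructure → Spec_matchRNAStructure RNAStructure (matchRNAStructure RNAStructure)

-- ===== LEMMAS AND PROOFS =====

-- proof-only middle machine: a single positional stack (top first)
def stepM (st : List Int × List Nat) (p : Char × Nat) : List Int × List Nat :=
  let m := st.1
  let stk := st.2
  if p.1 = '(' then (m, p.2 :: stk)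
  else if p.1 = ')' then
    match stk with
    | [] => st
    | j :: t => ((m.set p.2 (j : Int)).set j (p.2 : Int), t)
  else st

-- Invariant: A's stack is its unmatched '(' poses (= M's stack) above a run of unmatched ')'s; matched lists coincide.
theorem fold_inv : ∀ (l : List (Char × Nat)) (m : List Int) (stkB cs : List Nat),
    (l.foldl stepA (m, List.replicate stkB.length '(' ++ List.replicate cs.length ')', stkB ++ cs)).1
      = (l.foldl stepM (m, stkB)).1 := by
  intro l
  induction l with
  | nil => intro m stkB cs; rfl
  | cons p l ih =>
    intro m stkB cs
    obtain ⟨a, i⟩ := p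
    by_cases ha : a = '('
    · subst ha
      cases stkB with
      | nil =>
        cases cs with
        | nil => simpa [stepA, stepM, isParenthese] using ih m [i] []
        | cons k u => simpa [stepA, stepM, isParenthese, List.replicate_succ] using ih m [i] (k :: u)
      | cons j t => simpa [stepA, stepM, isParenthese, List.replicate_succ] using ih m (i :: j :: t) cs
    · by_cases hb : a = ')'
      · subst hb
        cases stkB with
        | nil =>
          cases cs with
          | nil => simpa [stepA, stepM, isParenthese] using ih m [] [i]
          | cons k u => simpa [stepA, stepM, isParenthese, List.replicate_succ] using ih m [] (i :: k :: u)
        | cons j t =>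
          simpa [stepA, stepM, isParenthese, List.replicate_succ] using
            ih ((m.set i (j : Int)).set j (i : Int)) t cs
      · simpa [stepA, stepM, isParenthese, ha, hb] using ih m stkB cs

-- the slice of zipIdx positions [a, b)
def seg (cs : List Char) (a b : Nat) : List (Char × Nat) :=
  (cs.zipIdx.drop a).take (b - a)

theorem seg_cons (cs : List Char) (a b : Nat) (h1 : a < b) (h2 : a < cs.length) :
    seg cs a b = (cs[a], a) :: seg cs (a + 1) b := by
  unfold seg
  have hz : a < cs.zipIdx.length := by simpa using h2
  rw [List.drop_eq_getElem_cons hz]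
  have : b - a = (b - (a + 1)) + 1 := by omega
  rw [this, List.take_succ_cons]
  simp

theorem seg_append (cs : List Char) (a b c : Nat) (h1 : a ≤ b) (h2 : b ≤ c) :
    seg cs a b ++ seg cs b c = seg cs a c := by
  unfold seg
  have : c - a = (b - a) + (c - b) := by omega
  rw [this, List.take_add, List.drop_drop]
  have : a + (b - a) = b := by omega
  rw [this]

theorem seg_to_end (cs : List Char) (a : Nat) :
    seg cs a cs.length = cs.zipIdx.drop a := by
  unfold seg
  apply List.take_of_length_le
  simp

-- core lemma about seq: its effect is that of the middle machine on the consumed slice,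
-- independent of the stack below (pend = unmatched '(' positions left on the stack).
theorem seq_spec (cs : List Char) : ∀ (fuel i : Nat) (m : List Int),
    cs.length - i < fuel → i ≤ cs.length →
    i ≤ (seqB cs cs.length fuel i m).1 ∧ (seqB cs cs.length fuel i m).1 ≤ cs.length ∧
      (((seqB cs cs.length fuel i m).1 = cs.length ∧ ∃ pend, ∀ stk,
            (cs.zipIdx.drop i).foldl stepM (m, stk) = ((seqB cs cs.length fuel i m).2, pend ++ stk))
        ∨ ((seqB cs cs.length fuel i m).1 < cs.length ∧
            cs.getD (seqB cs cs.length fuel i m).1 ' ' = ')' ∧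
            ∀ stk, (seg cs i (seqB cs cs.length fuel i m).1).foldl stepM (m, stk)
              = ((seqB cs cs.length fuel i m).2, stk))) := by
  intro fuel
  induction fuel with
  | zero => intro i m hf; omega
  | succ fuel ih =>
    intro i m hf hi
    by_cases hin : i < cs.length
    · have hx : cs[i]? = some (cs[i]'hin) := List.getElem?_eq_getElem hin
      have hgd : cs.getD i ' ' = cs[i]'hin := List.getD_eq_getElem cs ' ' hin
      have hdrop : cs.zipIdx.drop i = (cs[i]'hin, i) :: cs.zipIdx.drop (i + 1) := by
        have hz : i < cs.zipIdx.length := by simpa using hin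
        rw [List.drop_eq_getElem_cons hz]; simp
      by_cases hc : cs[i]'hin = '('
      · -- '(' case
        obtain ⟨h1le, h1n, h1cases⟩ := ih (i + 1) m (by omega) (by omega)
        have hstep : ∀ (mm : List Int) stk, stepM (mm, stk) (cs[i]'hin, i) = (mm, i :: stk) := by
          intro mm stk; simp [stepM, hc]
        rcases h1cases with ⟨hjn, pend1, hfold1⟩ | ⟨hjlt, hjch, hfold1⟩
        · -- inner consumed everything: unmatched '('
          have hr : seqB cs cs.length (fuel + 1) i m
              = (cs.length, (seqB cs cs.length fuel (i + 1) m).2) := by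
            simp [seqB, hin, List.getD, hc, hjn]
          rw [hr]
          refine ⟨by omega, by omega, Or.inl ⟨rfl, pend1 ++ [i], ?_⟩⟩
          intro stk
          rw [hdrop]
          simp only [List.foldl_cons]
          rw [hstep m stk, hfold1 (i :: stk)]
          simp
        · -- inner stopped at an unmatched-at-its-level ')' at j1: match (i, j1), continue after j1
          set j1 := (seqB cs cs.length fuel (i + 1) m).1 with hj1
          set m1 := (seqB cs cs.length fuel (i + 1) m).2 with hm1v
          have hj1ch : cs[j1]'hjlt = ')' := by
            rw [← List.getD_eq_getElem cs ' ' hjlt]; exact hjch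
          set m2 := (m1.set i (j1 : Int)).set j1 (i : Int) with hm2
          have hr : seqB cs cs.length (fuel + 1) i m = seqB cs cs.length fuel (j1 + 1) m2 := by
            have hne : j1 ≠ cs.length := by omega
            simp [seqB, hin, List.getD, hc, ← hj1, ← hm1v, ← hm2, hne]
          rw [hr]
          obtain ⟨h2le, h2n, h2cases⟩ := ih (j1 + 1) m2 (by omega) (by omega)
          -- the middle machine's effect over seg i (j1+1): push i, inner region, pop-match at j1
          have hmid : ∀ stk, (seg cs i (j1 + 1)).foldl stepM (m, stk) = (m2, stk) := by
            intro stk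
            have hs1 : seg cs i (j1 + 1) = (cs[i]'hin, i) :: (seg cs (i+1) j1 ++ seg cs j1 (j1+1)) := by
              rw [seg_append cs (i+1) j1 (j1+1) (by omega) (by omega)]
              exact seg_cons cs i (j1 + 1) (by omega) hin
            have hs2 : seg cs j1 (j1 + 1) = [(cs[j1]'hjlt, j1)] := by
              rw [seg_cons cs j1 (j1+1) (by omega) hjlt]
              unfold seg; simp
            rw [hs1, hs2]
            simp only [List.foldl_cons, List.foldl_append]
            rw [hstep m stk, hfold1 (i :: stk)]
            simp only [List.foldl_nil]
            have hpop : stepM (m1, i :: stk) (cs[j1]'hjlt, j1)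
                = ((m1.set j1 (i : Int)).set i (j1 : Int), stk) := by
              simp [stepM, hj1ch]
            rw [hpop, hm2]
            have hne : i ≠ j1 := by omega
            rw [List.set_comm (j1 : Int) (i : Int) hne]
          rcases h2cases with ⟨hkn, pend2, hfold2⟩ | ⟨hklt, hkch, hfold2⟩
          · refine ⟨by omega, by omega, Or.inl ⟨hkn, pend2, ?_⟩⟩
            intro stk
            have hsplit : cs.zipIdx.drop i = seg cs i (j1 + 1) ++ cs.zipIdx.drop (j1 + 1) := by
              rw [← seg_to_end cs (j1 + 1), seg_append cs i (j1+1) cs.length (by omega) (by omega),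
                seg_to_end]
            rw [hsplit, List.foldl_append, hmid stk, hfold2 stk]
          · refine ⟨by omega, by omega, Or.inr ⟨hklt, hkch, ?_⟩⟩
            intro stk
            have hsplit : seg cs i (seqB cs cs.length fuel (j1 + 1) m2).1
                = seg cs i (j1 + 1) ++ seg cs (j1 + 1) (seqB cs cs.length fuel (j1 + 1) m2).1 := by
              rw [seg_append cs i (j1+1) _ (by omega) (by omega)]
            rw [hsplit, List.foldl_append, hmid stk, hfold2 stk]
      · by_cases hc2 : cs[i]'hin = ')'
        · -- stop here
          have hr : seqB cs cs.length (fuel + 1) i m = (i, m) := by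
            simp [seqB, hin, List.getD, hc2]
          rw [hr]
          refine ⟨by omega, by omega, Or.inr ⟨hin, by rw [hgd]; exact hc2, ?_⟩⟩
          intro stk
          unfold seg; simp
        · -- other character: skip
          have hr : seqB cs cs.length (fuel + 1) i m = seqB cs cs.length fuel (i + 1) m := by
            simp [seqB, hin, List.getD, hc, hc2]
          rw [hr]
          obtain ⟨h1le, h1n, h1cases⟩ := ih (i + 1) m (by omega) (by omega)
          have hstep : ∀ stk, stepM (m, stk) (cs[i]'hin, i) = (m, stk) := by
            intro stk; simp [stepM, hc, hc2]
          rcases h1cases with ⟨hjn, pend1, hfold1⟩ | ⟨hjlt, hjch, hfold1⟩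
          · refine ⟨by omega, by omega, Or.inl ⟨hjn, pend1, ?_⟩⟩
            intro stk
            rw [hdrop]
            simp only [List.foldl_cons]
            rw [hstep stk]
            exact hfold1 stk
          · refine ⟨by omega, by omega, Or.inr ⟨hjlt, hjch, ?_⟩⟩
            intro stk
            have hsc : seg cs i (seqB cs cs.length fuel (i + 1) m).1
                = (cs[i]'hin, i) :: seg cs (i + 1) (seqB cs cs.length fuel (i + 1) m).1 :=
              seg_cons cs i _ (by omega) hin
            rw [hsc]
            simp only [List.foldl_cons]
            rw [hstep stk]
            exact hfold1 stk
    · have hr : seqB cs cs.length (fuel + 1) i m = (cs.length, m) := by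
        simp [seqB, hin]
      rw [hr]
      refine ⟨by omega, by omega, Or.inl ⟨rfl, [], ?_⟩⟩
      intro stk
      have : cs.zipIdx.drop i = [] := by
        apply List.drop_eq_nil_of_le; simp; omega
      rw [this]
      simp

-- the top loop computes the middle machine's fold from index i with empty stack
theorem loop_spec (cs : List Char) : ∀ (fuel i : Nat) (m : List Int),
    cs.length - i < fuel →
    loopB cs cs.length fuel i m = ((cs.zipIdx.drop i).foldl stepM (m, [])).1 := by
  intro fuel
  induction fuel with
  | zero => intro i m hf; omega
  | succ fuel ih =>
    intro i m hf
    by_cases hin : i < cs.length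
    · obtain ⟨hle, hn, hcases⟩ := seq_spec cs (cs.length + 1) i m (by omega) (by omega)
      set r := seqB cs cs.length (cs.length + 1) i m with hrdef
      rcases hcases with ⟨hjn, pend, hfold⟩ | ⟨hjlt, hjch, hfold⟩
      · have hstop : ¬ (r.1 < cs.length) := by omega
        have : loopB cs cs.length (fuel + 1) i m = r.2 := by
          simp [loopB, hin, ← hrdef, hstop]
        rw [this, hfold []]
      · have hloop : loopB cs cs.length (fuel + 1) i m = loopB cs cs.length fuel (r.1 + 1) r.2 := by
          simp [loopB, hin, ← hrdef, hjlt]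
        have hjg : cs[r.1]'hjlt = ')' := by
          rw [← List.getD_eq_getElem cs ' ' hjlt]; exact hjch
        have hsplit : cs.zipIdx.drop i
            = seg cs i r.1 ++ ((cs[r.1]'hjlt, r.1) :: cs.zipIdx.drop (r.1 + 1)) := by
          have h1 : seg cs r.1 cs.length = (cs[r.1]'hjlt, r.1) :: seg cs (r.1+1) cs.length :=
            seg_cons cs r.1 cs.length hjlt hjlt
          rw [← seg_to_end cs i, ← seg_append cs i r.1 cs.length hle (by omega), h1, seg_to_end]
        rw [hloop, ih (r.1 + 1) r.2 (by omega), hsplit, List.foldl_append, hfold []]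
        simp only [List.foldl_cons]
        have : stepM (r.2, []) (cs[r.1]'hjlt, r.1) = (r.2, []) := by
          simp [stepM, hjg]
        rw [this]
    · have h1 : loopB cs cs.length (fuel + 1) i m = m := by
        simp [loopB, hin]
      have h2 : cs.zipIdx.drop i = [] := by
        apply List.drop_eq_nil_of_le; simp; omega
      rw [h1, h2]
      simp

-- ===== VERDICT (by name: the statement is the Claim_ definition above) =====
theorem matchRNAStructure_spec : Claim_equal_matchRNAStructure := by
  intro s _
  unfold Spec_matchRNAStructure matchRNAStructure matchRNAStructure_alt
  rw [loop_spec s.toList (s.toList.length + 1) 0 _ (by omega)]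
  simpa using fold_inv s.toList.zipIdx (List.replicate s.toList.length (-1)) [] []
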